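-- pv_equiv track=rewrite | github.com/beauvilerobed/data-structures-and-algorithms | greedy-MST-dynamic-programming/assignment2/clustering.py | largest_clusters
-- ===== SOURCE A (Python) =====
-- import itertools
-- import copy
--
-- class Subset:
--     def __init__(self, parent, rank):
--         self.parent = parent
--         self.rank = rank
--
-- def find(subsets, node):
--     while subsets[node].parent != node:
--         node = subsets[node].parent
--     return node
--
-- def union(subsets, u, v):
--     u = find(subsets, u)
--     v = find(subsets, v)
--     if u == v:
--         return False
--     if subsets[u].rank > subsets[v].rank:
--         subsets[v].parent = u
--         return v
--     else:
--         subsets[u].parent = v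
--         if subsets[u].rank == subsets[v].rank:
--             subsets[v].rank += 1
--         return u
--
-- def largest_clusters(vertices, num_of_vertices, spacing=2):
--     leaders = {}
--
--     for i, vertex in enumerate(vertices):
--         leaders[vertex] = i + 1
--
--     leader_board = [i for i in range(num_of_vertices + 1)]
--     clusters = [Subset(i, 0) for i in range(num_of_vertices + 1)]
--     number_of_leaders = len(leaders)
--     for i in range(1, spacing + 1):
--         for vertex in vertices:
--             within_spacing = hamming_possibilies(vertex, i)
--             for neighber in within_spacing:
--                 if neighber in leaders:
--                     if find(clusters, leaders[vertex]) ==\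
--                        find(clusters, leaders[neighber]):
--                         continue
--                     leader_to_remove =\
--                         union(clusters, leaders[vertex], leaders[neighber])
--                     if leader_board[leader_to_remove] != 0:
--                         number_of_leaders -= 1
--                         leader_board[leader_to_remove] = 0
--     return number_of_leaders
--
-- def switch(bit):
--     if bit == 1:
--         return 0
--     return 1
--
-- def hamming_possibilies(vertex, distance):
--     coordinates = itertools.combinations(range(len(vertex)), distance)
--     vertex = [letter for letter in vertex]
--     vertices = list()
--     for coordinate in coordinates:
--         new_vertex = copy.copy(vertex)
--         for index in coordinate:
--             bit = int(vertex[index])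
--             new_vertex[index] = str(switch(bit))
--         new_vertex = "".join(new_vertex)
--         vertices.append(new_vertex)
--
--     return vertices
-- ===== SOURCE B (Python) =====
-- import itertools
--
--
-- def largest_clusters(vertices, num_of_vertices, spacing=2):
--     label = {}
--     for i, vertex in enumerate(vertices):
--         label[vertex] = i + 1
--
--     for i in range(1, spacing + 1):
--         for vertex in vertices:
--             for neighbor in hamming_neighbors(vertex, i):
--                 if neighbor in label:
--                     lu, lw = label[vertex], label[neighbor]
--                     if lu != lw:
--                         for key in label:
--                             if label[key] == lw:
--                                 label[key] = lu
--
--     return len(set(label.values()))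
--
--
-- def hamming_neighbors(vertex, distance):
--     chars = list(vertex)
--     out = []
--     for coordinate in itertools.combinations(range(len(chars)), distance):
--         picked = set(coordinate)
--         out.append("".join(("0" if c == "1" else "1") if j in picked else c
--                            for j, c in enumerate(chars)))
--     return out
-- ===== Notes on version B (the rewrite author's own statement) =====
-- stated objective: simpler
-- what changed: B drops the union-find entirely (no Subset objects, no find/union, no ranks, no leader_board): it keeps one label per distinct vertex and, when an edge joins two differently-labelled vertices, relabels the whole smaller-equivalence class by a linear scan over the dict, returning len(set(label.values())) at the end; neighbours are built by a flip-if-picked comprehension instead of copy-and-assign.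
-- outside the precondition, e.g. on largest_clusters(['5'], 0, 1): A returns 1, B returns 1; on largest_clusters(['01', '00'], 1, 1): A raises IndexError, B returns 1
import Mathlib
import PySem

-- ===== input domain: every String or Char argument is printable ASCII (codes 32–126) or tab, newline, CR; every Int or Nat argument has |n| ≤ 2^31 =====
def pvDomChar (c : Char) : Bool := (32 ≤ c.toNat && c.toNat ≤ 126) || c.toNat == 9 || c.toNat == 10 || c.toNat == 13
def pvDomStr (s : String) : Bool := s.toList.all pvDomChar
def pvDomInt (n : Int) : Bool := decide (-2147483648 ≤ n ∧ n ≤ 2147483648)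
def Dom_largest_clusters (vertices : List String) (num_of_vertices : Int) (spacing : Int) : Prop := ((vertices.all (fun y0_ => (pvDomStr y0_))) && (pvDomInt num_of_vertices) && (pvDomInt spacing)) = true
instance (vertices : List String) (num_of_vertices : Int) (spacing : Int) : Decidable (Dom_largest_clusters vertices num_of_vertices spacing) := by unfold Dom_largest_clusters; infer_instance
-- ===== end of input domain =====

-- B drops the union-find entirely: it keeps one component label per distinct vertex,
-- relabels a whole class by a linear scan of the dict on each merging edge, and returns
-- the number of distinct labels at the end (objective: simpler; no speed claim).

-- ===== PORT A =====
-- Port of A. find's while-loop is ported with fuel subsets.length + 1, which suffices on every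
-- union-by-rank parent structure this function builds (rank strictly increases along parent edges).
-- itertools.combinations(range(len(vertex)), distance) is PySem.List.combinations over pyRange;
-- distance is i.toNat (the loop only produces i ≥ 1). int(vertex[index]) is PySem.Int.ofChars? on the
-- one-char string (default 0 is never used under Pre_, which requires digit strings when spacing ≥ 1).
def pvSwitchA (bit : Int) : Int := if bit == 1 then 0 else 1

def pvFlipA (c : Char) : Char :=
  ((PySem.Int.toChars (pvSwitchA ((PySem.Int.ofChars? [c]).getD 0))).headD '?')

def hamming_possibilies (vertex : String) (distance : Nat) : List String :=
  let chars := vertex.toList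
  (PySem.List.combinations (PySem.List.pyRange 0 chars.length 1) distance).map
    (fun coordinate =>
      String.ofList (coordinate.foldl
        (fun nv index => PySem.List.pySetD nv index (pvFlipA (PySem.List.pyGetD chars index ' ')))
        chars))

def pvFindA (subsets : List (Int × Int)) (node : Int) (fuel : Nat) : Int :=
  match fuel with
  | 0 => node
  | f + 1 =>
    let p := (PySem.List.pyGetD subsets node ((0 : Int), (0 : Int))).1
    if p ≠ node then pvFindA subsets p f else node

-- Python's union returns the removed leader (an index); the 'return False' branch is unreachable in
-- largest_clusters (it is guarded by the find == find check) and False-as-index is 0, so it is ported as 0.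
def pvUnionA (subsets : List (Int × Int)) (u0 v0 : Int) : List (Int × Int) × Int :=
  let u := pvFindA subsets u0 (subsets.length + 1)
  let v := pvFindA subsets v0 (subsets.length + 1)
  if u == v then (subsets, 0)
  else if (PySem.List.pyGetD subsets u ((0 : Int), (0 : Int))).2 >
          (PySem.List.pyGetD subsets v ((0 : Int), (0 : Int))).2 then
    (PySem.List.pySetD subsets v (u, (PySem.List.pyGetD subsets v ((0 : Int), (0 : Int))).2), v)
  else
    let s1 := PySem.List.pySetD subsets u (v, (PySem.List.pyGetD subsets u ((0 : Int), (0 : Int))).2)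
    let s2 := if (PySem.List.pyGetD s1 u ((0 : Int), (0 : Int))).2 ==
                 (PySem.List.pyGetD s1 v ((0 : Int), (0 : Int))).2 then
                PySem.List.pySetD s1 v ((PySem.List.pyGetD s1 v ((0 : Int), (0 : Int))).1,
                                        (PySem.List.pyGetD s1 v ((0 : Int), (0 : Int))).2 + 1)
              else s1
    (s2, u)

def largest_clusters (vertices : List String) (num_of_vertices : Int) (spacing : Int) : Int :=
  let leaders : PySem.Dict String Int :=
    (PySem.List.enumerate vertices).foldl (fun d iv => d.insert iv.2 (iv.1 + 1)) PySem.Dict.empty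
  let leader_board : List Int := List.map (fun (i : Nat) => (i : Int)) (List.range (num_of_vertices + 1).toNat)
  let clusters : List (Int × Int) := List.map (fun (i : Nat) => ((i : Int), (0 : Int))) (List.range (num_of_vertices + 1).toNat)
  let number_of_leaders : Int := (leaders.size : Int)
  let st := (PySem.List.pyRange 1 (spacing + 1) 1).foldl (fun st i =>
      vertices.foldl (fun st vertex =>
        (hamming_possibilies vertex i.toNat).foldl (fun st neighber =>
          if leaders.contains neighber then
            if pvFindA st.1 (leaders.getD vertex 0) (st.1.length + 1) ==
               pvFindA st.1 (leaders.getD neighber 0) (st.1.length + 1) then st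
            else
              let res := pvUnionA st.1 (leaders.getD vertex 0) (leaders.getD neighber 0)
              if PySem.List.pyGetD st.2.1 res.2 0 ≠ 0 then
                (res.1, PySem.List.pySetD st.2.1 res.2 0, st.2.2 - 1)
              else (res.1, st.2.1, st.2.2)
          else st) st) st) (clusters, leader_board, number_of_leaders)
  st.2.2

-- ===== PORT B =====
-- Port of B: one label per distinct vertex; a merging edge relabels the whole class of the
-- neighbour's label to the vertex's label by a scan over the dict keys; the result is the
-- number of distinct labels. Hamming neighbours are built by a flip-if-picked comprehension.
def pvFlipB (c : Char) : Char := if c == '1' then '0' else '1'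

def pvHammingB (vertex : String) (distance : Nat) : List String :=
  let chars := vertex.toList
  (PySem.List.combinations (PySem.List.pyRange 0 chars.length 1) distance).map
    (fun coordinate =>
      let picked : PySem.Set Int := PySem.Set.ofList coordinate
      String.ofList ((PySem.List.enumerate chars).map
        (fun jc => if PySem.Set.contains picked jc.1 then pvFlipB jc.2 else jc.2)))

def largest_clusters_alt (vertices : List String) (num_of_vertices : Int) (spacing : Int) : Int :=
  let label0 : PySem.Dict String Int :=
    (PySem.List.enumerate vertices).foldl (fun d iv => d.insert iv.2 (iv.1 + 1)) PySem.Dict.empty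
  let label := (PySem.List.pyRange 1 (spacing + 1) 1).foldl (fun lab i =>
      vertices.foldl (fun lab vertex =>
        (pvHammingB vertex i.toNat).foldl (fun lab neighbor =>
          if lab.contains neighbor then
            if lab.getD vertex 0 ≠ lab.getD neighbor 0 then
              lab.keys.foldl (fun l key =>
                if l.getD key 0 == lab.getD neighbor 0 then l.insert key (lab.getD vertex 0) else l) lab
            else lab
          else lab) lab) lab) label0
  PySem.Set.len (PySem.Set.ofList label.values)

-- ===== PRECONDITION & SPEC =====
-- Pre_ admits the inputs where Python A returns: with spacing ≤ 0 or no vertices A performs no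
-- union and returns len(leaders) for any strings; with spacing ≥ 1 A raises ValueError (int() on a
-- non-digit char) on non-digit vertices and IndexError when a leader id exceeds num_of_vertices and
-- a union is attempted, so Pre_ then requires digit strings and vertices.length ≤ num_of_vertices.
-- This is slightly narrower than A's exact domain: when spacing ≥ 1 and no generated neighbour is
-- ever present in leaders, A also returns (see claim cites); B returns the same value there.
def Pre_largest_clusters (vertices : List String) (num_of_vertices : Int) (spacing : Int) : Prop :=
  vertices = [] ∨ spacing ≤ 0 ∨ ((vertices.length : Int) ≤ num_of_vertices ∧
    (vertices.all (fun v =>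
      v.toList.all (fun c => decide (48 ≤ c.toNat) && decide (c.toNat ≤ 57)))) = true)

instance (vertices : List String) (num_of_vertices : Int) (spacing : Int) :
    Decidable (Pre_largest_clusters vertices num_of_vertices spacing) := by
  unfold Pre_largest_clusters; infer_instance

def pvWitness_largest_clusters : List String × Int × Int := (["01", "10"], 2, 1)

def Spec_largest_clusters (vertices : List String) (num_of_vertices : Int) (spacing : Int) (out : Int) : Prop := out = largest_clusters_alt vertices num_of_vertices spacing
instance (vertices : List String) (num_of_vertices : Int) (spacing : Int) (out : Int) : Decidable (Spec_largest_clusters vertices num_of_vertices spacing out) := by unfold Spec_largest_clusters; infer_instance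

-- ===== CLAIM (what is proved, stated in full; the proofs are below) =====
def Claim_equal_largest_clusters : Prop := ∀ (vertices : List String) (num_of_vertices : Int) (spacing : Int), Dom_largest_clusters vertices num_of_vertices spacing → Pre_largest_clusters vertices num_of_vertices spacing → Spec_largest_clusters vertices num_of_vertices spacing (largest_clusters vertices num_of_vertices spacing)

-- ===== LEMMAS AND PROOFS =====

-- Ghost union-find (the proof's model of A's clusters list; not part of either port):
-- parent/rank projections of A's Subset pairs, used to simulate A's fold.
def pvFindB (parent : List Int) (node : Int) (fuel : Nat) : Int :=
  match fuel with
  | 0 => node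
  | f + 1 =>
    let p := PySem.List.pyGetD parent node 0
    if p ≠ node then pvFindB parent p f else node

def pvUnionB (parent rank : List Int) (u0 v0 : Int) : List Int × List Int :=
  let u := pvFindB parent u0 (parent.length + 1)
  let v := pvFindB parent v0 (parent.length + 1)
  if u == v then (parent, rank)
  else if PySem.List.pyGetD rank u 0 > PySem.List.pyGetD rank v 0 then
    (PySem.List.pySetD parent v u, rank)
  else
    let p2 := PySem.List.pySetD parent u v
    if PySem.List.pyGetD rank u 0 == PySem.List.pyGetD rank v 0 then
      (p2, PySem.List.pySetD rank v (PySem.List.pyGetD rank v 0 + 1))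
    else (p2, rank)

def pvWF (p r : List Int) : Prop :=
  r.length = p.length ∧
  ∀ j : Nat, j < p.length →
    ∃ m : Nat, m < p.length ∧ PySem.List.pyGetD p (j : Int) 0 = (m : Int) ∧
      ((m : Int) ≠ (j : Int) →
        PySem.List.pyGetD r (j : Int) 0 < PySem.List.pyGetD r (m : Int) 0)

def pvMu (p r : List Int) (x : Int) : Nat :=
  ((Finset.range p.length).filter
    (fun (m : Nat) => PySem.List.pyGetD r x 0 < PySem.List.pyGetD r ((m : Nat) : Int) 0)).card

lemma pvDigit_mem (c : Char) (h1 : 48 ≤ c.toNat) (h2 : c.toNat ≤ 57) :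
    c ∈ ['0','1','2','3','4','5','6','7','8','9'] := by
  have hc : c = Char.ofNat c.toNat := (Char.ofNat_toNat c).symm
  interval_cases hk : c.toNat <;> rw [hc] <;> decide

lemma pvGetD_oob {α : Type} (xs : List α) (x : Int) (d : α) (hx0 : 0 ≤ x)
    (h : xs.length ≤ x.toNat) : PySem.List.pyGetD xs x d = d := by
  rw [PySem.List.pyGetD_of_nonneg xs d hx0]
  exact List.getD_eq_default _ _ h

lemma pvGetD_setD {α : Type} (xs : List α) (a x : Int) (v d : α) (ha0 : 0 ≤ a)
    (haL : a.toNat < xs.length) (hx0 : 0 ≤ x) :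
    PySem.List.pyGetD (PySem.List.pySetD xs a v) x d =
      if x = a then v else PySem.List.pyGetD xs x d := by
  rw [PySem.List.pySetD_of_nonneg xs v ha0, PySem.List.pyGetD_of_nonneg _ d hx0,
      PySem.List.pyGetD_of_nonneg xs d hx0]
  rcases eq_or_ne x a with rfl | hne
  · simp [List.getD_eq_getElem?_getD, haL]
  · rw [if_neg hne]
    rw [List.getD_eq_getElem?_getD, List.getD_eq_getElem?_getD, List.getElem?_set_ne (by omega)]

lemma pvParent_nonneg {p r : List Int} (hw : pvWF p r) (x : Int) (hx0 : 0 ≤ x) :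
    0 ≤ PySem.List.pyGetD p x 0 := by
  by_cases hL : x.toNat < p.length
  · obtain ⟨m, _, hm, _⟩ := hw.2 x.toNat hL
    rw [show ((x.toNat : Nat) : Int) = x by omega] at hm
    rw [hm]; positivity
  · rw [pvGetD_oob p x 0 hx0 (by omega)]

lemma pvMu_step {p r : List Int} (hw : pvWF p r) (x : Int) (hx0 : 0 ≤ x)
    (hxL : x.toNat < p.length) (hne : PySem.List.pyGetD p x 0 ≠ x) :
    pvMu p r (PySem.List.pyGetD p x 0) < pvMu p r x := by
  obtain ⟨m, hmL, hm, hrk⟩ := hw.2 x.toNat hxL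
  rw [show ((x.toNat : Nat) : Int) = x by omega] at hm hrk
  have hrk' := hrk (by rw [hm] at hne; exact fun h => hne (by omega))
  unfold pvMu
  rw [hm] at *
  apply Finset.card_lt_card
  constructor
  · intro t ht
    simp only [Finset.mem_filter, Finset.mem_range] at *
    exact ⟨ht.1, lt_trans hrk' ht.2⟩
  · intro hsub
    have hmem : m ∈ (Finset.range p.length).filter
        (fun (t : Nat) => PySem.List.pyGetD r x 0 < PySem.List.pyGetD r ((t : Nat) : Int) 0) := by
      simp only [Finset.mem_filter, Finset.mem_range]; exact ⟨hmL, hrk'⟩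
    have := hsub hmem
    simp only [Finset.mem_filter] at this
    exact absurd this.2 (lt_irrefl _)

lemma pvMu_lt_len (p r : List Int) (x : Int) (hx0 : 0 ≤ x)
    (hxL : x.toNat < p.length) : pvMu p r x < p.length := by
  unfold pvMu
  have h1 : ((Finset.range p.length).filter
      (fun (m : Nat) => PySem.List.pyGetD r x 0 < PySem.List.pyGetD r ((m : Nat) : Int) 0))
      ⊆ (Finset.range p.length).erase x.toNat := by
    intro t ht
    simp only [Finset.mem_filter, Finset.mem_range, Finset.mem_erase] at *
    refine ⟨fun he => ?_, ht.1⟩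
    subst he
    rw [show ((x.toNat : Nat) : Int) = x by omega] at ht
    exact absurd ht.2 (lt_irrefl _)
  calc _ ≤ _ := Finset.card_le_card h1
    _ < p.length := by
        rw [Finset.card_erase_of_mem (by simpa using hxL), Finset.card_range]; omega

lemma pvParent_lt {p r : List Int} (hw : pvWF p r) (x : Int) (hx0 : 0 ≤ x)
    (hxL : x.toNat < p.length) : (PySem.List.pyGetD p x 0).toNat < p.length := by
  obtain ⟨m, hmL, hm, _⟩ := hw.2 x.toNat hxL
  rw [show ((x.toNat : Nat) : Int) = x by omega] at hm
  rw [hm]; omega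

lemma pvFind_root (p : List Int) (x : Int) (f : Nat)
    (hr : PySem.List.pyGetD p x 0 = x) : pvFindB p x (f + 1) = x := by
  simp [pvFindB, hr]

lemma pvFind_spec {p r : List Int} (hw : pvWF p r) :
    ∀ (k : Nat) (x : Int), pvMu p r x ≤ k → 0 ≤ x → x.toNat < p.length →
      ∃ ρ : Nat, ρ < p.length ∧ PySem.List.pyGetD p (ρ : Int) 0 = (ρ : Int) ∧
        ∀ fuel, pvMu p r x < fuel → pvFindB p x fuel = (ρ : Int) := by
  intro k
  induction k with
  | zero =>
    intro x hk hx0 hxL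
    by_cases hr : PySem.List.pyGetD p x 0 = x
    · refine ⟨x.toNat, by omega, ?_, ?_⟩
      · rw [show ((x.toNat : Nat) : Int) = x by omega]; exact hr
      · intro fuel hf
        obtain ⟨f, rfl⟩ : ∃ f, fuel = f + 1 := ⟨fuel - 1, by omega⟩
        rw [show ((x.toNat : Nat) : Int) = x by omega]
        exact pvFind_root p x f hr
    · exact absurd (pvMu_step hw x hx0 hxL hr) (by omega)
  | succ k ih =>
    intro x hk hx0 hxL
    by_cases hr : PySem.List.pyGetD p x 0 = x
    · refine ⟨x.toNat, by omega, ?_, ?_⟩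
      · rw [show ((x.toNat : Nat) : Int) = x by omega]; exact hr
      · intro fuel hf
        obtain ⟨f, rfl⟩ : ∃ f, fuel = f + 1 := ⟨fuel - 1, by omega⟩
        rw [show ((x.toNat : Nat) : Int) = x by omega]
        exact pvFind_root p x f hr
    · have hstep := pvMu_step hw x hx0 hxL hr
      have hy0 := pvParent_nonneg hw x hx0
      have hyL := pvParent_lt hw x hx0 hxL
      obtain ⟨ρ, hρL, hρr, hρf⟩ := ih (PySem.List.pyGetD p x 0) (by omega) hy0 hyL
      refine ⟨ρ, hρL, hρr, ?_⟩
      intro fuel hf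
      obtain ⟨f, rfl⟩ : ∃ f, fuel = f + 1 := ⟨fuel - 1, by omega⟩
      show (if PySem.List.pyGetD p x 0 ≠ x then pvFindB p (PySem.List.pyGetD p x 0) f else x) = _
      rw [if_pos hr]
      exact hρf f (by omega)

lemma pvFind_props {p r : List Int} (hw : pvWF p r) (x : Int) (hx0 : 0 ≤ x)
    (hxL : x.toNat < p.length) :
    0 ≤ pvFindB p x (p.length + 1) ∧ (pvFindB p x (p.length + 1)).toNat < p.length ∧
      PySem.List.pyGetD p (pvFindB p x (p.length + 1)) 0 = pvFindB p x (p.length + 1) ∧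
      (∀ fuel, pvMu p r x < fuel → pvFindB p x fuel = pvFindB p x (p.length + 1)) := by
  obtain ⟨ρ, hρL, hρr, hρf⟩ := pvFind_spec hw (pvMu p r x) x le_rfl hx0 hxL
  have htop := hρf (p.length + 1) (by have := pvMu_lt_len p r x hx0 hxL; omega)
  rw [htop]
  exact ⟨by omega, by omega, hρr, fun fuel hf => by rw [hρf fuel hf]⟩

lemma pvFind_set {p r : List Int} (hw : pvWF p r) (a b : Int) (ha0 : 0 ≤ a)
    (haL : a.toNat < p.length) (hb0 : 0 ≤ b) (hbL : b.toNat < p.length)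
    (hra : PySem.List.pyGetD p a 0 = a) (hrb : PySem.List.pyGetD p b 0 = b) (hab : a ≠ b) :
    ∀ (k : Nat) (x : Int), pvMu p r x ≤ k → 0 ≤ x → x.toNat < p.length →
      ∀ fuel, pvMu p r x < fuel →
        pvFindB (PySem.List.pySetD p a b) x (fuel + 1) =
          (if pvFindB p x fuel = a then b else pvFindB p x fuel) := by
  intro k
  induction k with
  | zero =>
    intro x hk hx0 hxL fuel hf
    by_cases hr : PySem.List.pyGetD p x 0 = x
    swap
    · exact absurd (pvMu_step hw x hx0 hxL hr) (by omega)
    obtain ⟨f, rfl⟩ : ∃ f, fuel = f + 1 := ⟨fuel - 1, by omega⟩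
    rw [pvFind_root p x f hr]
    rcases eq_or_ne x a with rfl | hxa
    · rw [if_pos rfl]
      show (if PySem.List.pyGetD (PySem.List.pySetD p x b) x 0 ≠ x then
        pvFindB (PySem.List.pySetD p x b) (PySem.List.pyGetD (PySem.List.pySetD p x b) x 0) (f+1)
        else x) = b
      rw [pvGetD_setD p x x b 0 ha0 haL hx0, if_pos rfl, if_pos hab.symm]
      have hgb : PySem.List.pyGetD (PySem.List.pySetD p x b) b 0 = b := by
        rw [pvGetD_setD p x b b 0 ha0 haL hb0, if_neg (Ne.symm hab), hrb]
      exact pvFind_root _ b f hgb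
    · rw [if_neg hxa]
      apply pvFind_root
      rw [pvGetD_setD p a x b 0 ha0 haL hx0, if_neg hxa, hr]
  | succ k ih =>
    intro x hk hx0 hxL fuel hf
    by_cases hr : PySem.List.pyGetD p x 0 = x
    · obtain ⟨f, rfl⟩ : ∃ f, fuel = f + 1 := ⟨fuel - 1, by omega⟩
      rw [pvFind_root p x f hr]
      rcases eq_or_ne x a with rfl | hxa
      · rw [if_pos rfl]
        show (if PySem.List.pyGetD (PySem.List.pySetD p x b) x 0 ≠ x then
          pvFindB (PySem.List.pySetD p x b) (PySem.List.pyGetD (PySem.List.pySetD p x b) x 0) (f+1)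
          else x) = b
        rw [pvGetD_setD p x x b 0 ha0 haL hx0, if_pos rfl, if_pos hab.symm]
        have hgb : PySem.List.pyGetD (PySem.List.pySetD p x b) b 0 = b := by
          rw [pvGetD_setD p x b b 0 ha0 haL hb0, if_neg (Ne.symm hab), hrb]
        exact pvFind_root _ b f hgb
      · rw [if_neg hxa]
        apply pvFind_root
        rw [pvGetD_setD p a x b 0 ha0 haL hx0, if_neg hxa, hr]
    · have hstep := pvMu_step hw x hx0 hxL hr
      have hy0 := pvParent_nonneg hw x hx0
      have hyL := pvParent_lt hw x hx0 hxL
      obtain ⟨f, rfl⟩ : ∃ f, fuel = f + 1 := ⟨fuel - 1, by omega⟩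
      have hxa : x ≠ a := fun h => hr (by rw [h]; exact hra)
      have lhs : pvFindB (PySem.List.pySetD p a b) x (f + 1 + 1) =
          pvFindB (PySem.List.pySetD p a b) (PySem.List.pyGetD p x 0) (f + 1) := by
        show (if PySem.List.pyGetD (PySem.List.pySetD p a b) x 0 ≠ x then
          pvFindB (PySem.List.pySetD p a b) (PySem.List.pyGetD (PySem.List.pySetD p a b) x 0) (f+1)
          else x) = _
        rw [pvGetD_setD p a x b 0 ha0 haL hx0, if_neg hxa, if_pos hr]
      have rhs : pvFindB p x (f + 1) = pvFindB p (PySem.List.pyGetD p x 0) f := by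
        show (if PySem.List.pyGetD p x 0 ≠ x then pvFindB p (PySem.List.pyGetD p x 0) f else x) = _
        rw [if_pos hr]
      rw [lhs, rhs]
      exact ih (PySem.List.pyGetD p x 0) (by omega) hy0 hyL f (by omega)

lemma pvFind_set_top {p r : List Int} (hw : pvWF p r) (a b : Int) (ha0 : 0 ≤ a)
    (haL : a.toNat < p.length) (hb0 : 0 ≤ b) (hbL : b.toNat < p.length)
    (hra : PySem.List.pyGetD p a 0 = a) (hrb : PySem.List.pyGetD p b 0 = b) (hab : a ≠ b)
    (x : Int) (hx0 : 0 ≤ x) (hxL : x.toNat < p.length) :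
    pvFindB (PySem.List.pySetD p a b) x (p.length + 1) =
      (if pvFindB p x (p.length + 1) = a then b
       else pvFindB p x (p.length + 1)) := by
  have hμ := pvMu_lt_len p r x hx0 hxL
  have h1 := pvFind_set hw a b ha0 haL hb0 hbL hra hrb hab (pvMu p r x) x le_rfl hx0 hxL
      p.length (by omega)
  have h2 := (pvFind_props hw x hx0 hxL).2.2.2 p.length (by omega)
  rw [h1, h2]

lemma pvWF_link_lt {p r : List Int} (hw : pvWF p r) (a b : Int) (ha0 : 0 ≤ a)
    (haL : a.toNat < p.length) (hb0 : 0 ≤ b) (hbL : b.toNat < p.length)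
    (hrk : PySem.List.pyGetD r a 0 < PySem.List.pyGetD r b 0) :
    pvWF (PySem.List.pySetD p a b) r := by
  obtain ⟨hlen, hwf⟩ := hw
  refine ⟨by rw [PySem.List.length_pySetD]; exact hlen, ?_⟩
  rw [PySem.List.length_pySetD]
  intro j hj
  rw [pvGetD_setD p a (j : Int) b 0 ha0 haL (by positivity)]
  by_cases hja : (j : Int) = a
  · refine ⟨b.toNat, by omega, ?_, ?_⟩
    · rw [if_pos hja, show ((b.toNat : Nat) : Int) = b by omega]
    · intro _
      rw [show ((b.toNat : Nat) : Int) = b by omega, hja]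
      exact hrk
  · rw [if_neg hja]
    exact hwf j hj

lemma pvWF_link_eq {p r : List Int} (hw : pvWF p r) (a b : Int) (ha0 : 0 ≤ a)
    (haL : a.toNat < p.length) (hb0 : 0 ≤ b) (hbL : b.toNat < p.length)
    (hra : PySem.List.pyGetD p a 0 = a) (hrb : PySem.List.pyGetD p b 0 = b) (hab : a ≠ b)
    (hrk : PySem.List.pyGetD r a 0 = PySem.List.pyGetD r b 0) :
    pvWF (PySem.List.pySetD p a b) (PySem.List.pySetD r b (PySem.List.pyGetD r b 0 + 1)) := by
  obtain ⟨hlen, hwf⟩ := hw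
  have hbLr : b.toNat < r.length := by omega
  refine ⟨by rw [PySem.List.length_pySetD, PySem.List.length_pySetD]; exact hlen, ?_⟩
  rw [PySem.List.length_pySetD]
  intro j hj
  have hj0 : (0 : Int) ≤ (j : Int) := by positivity
  rw [pvGetD_setD p a (j : Int) b 0 ha0 haL hj0]
  by_cases hja : (j : Int) = a
  · refine ⟨b.toNat, by omega, ?_, ?_⟩
    · rw [if_pos hja, show ((b.toNat : Nat) : Int) = b by omega]
    · intro _
      rw [show ((b.toNat : Nat) : Int) = b by omega, hja]
      rw [pvGetD_setD r b a _ 0 hb0 hbLr ha0, pvGetD_setD r b b _ 0 hb0 hbLr hb0,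
          if_neg hab, if_pos rfl, hrk]
      omega
  · rw [if_neg hja]
    obtain ⟨m, hmL, hm, hmr⟩ := hwf j hj
    refine ⟨m, hmL, hm, ?_⟩
    intro hmj
    have hjb : (j : Int) ≠ b := by
      intro h
      have : PySem.List.pyGetD p (j : Int) 0 = (j : Int) := by rw [h]; exact hrb
      rw [this] at hm
      exact hmj (by omega)
    rw [pvGetD_setD r b (j : Int) _ 0 hb0 hbLr hj0, if_neg hjb,
        pvGetD_setD r b (m : Int) _ 0 hb0 hbLr (by positivity)]
    by_cases hmb : (m : Int) = b
    · rw [if_pos hmb]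
      have := hmr hmj
      rw [hmb] at this
      omega
    · rw [if_neg hmb]
      exact hmr hmj

def pvCzip (c : List (Int × Int)) (p r : List Int) : Prop :=
  c.length = p.length ∧ r.length = p.length ∧
  ∀ x : Int, 0 ≤ x →
    PySem.List.pyGetD c x ((0 : Int), (0 : Int)) =
      (PySem.List.pyGetD p x 0, PySem.List.pyGetD r x 0)

lemma pvFindA_eq {c : List (Int × Int)} {p r : List Int} (hcz : pvCzip c p r)
    (hw : pvWF p r) : ∀ (fuel : Nat) (x : Int), 0 ≤ x →
    pvFindA c x fuel = pvFindB p x fuel := by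
  intro fuel
  induction fuel with
  | zero => intro x _; rfl
  | succ f ih =>
    intro x hx0
    show (if (PySem.List.pyGetD c x ((0:Int),(0:Int))).1 ≠ x then
            pvFindA c (PySem.List.pyGetD c x ((0:Int),(0:Int))).1 f else x) =
         (if PySem.List.pyGetD p x 0 ≠ x then pvFindB p (PySem.List.pyGetD p x 0) f else x)
    rw [hcz.2.2 x hx0]
    by_cases h : PySem.List.pyGetD p x 0 ≠ x
    · rw [if_pos h, if_pos h]
      exact ih _ (pvParent_nonneg hw x hx0)
    · rw [if_neg h, if_neg h]

lemma pvCzip_set1 {c : List (Int × Int)} {p r : List Int} (hcz : pvCzip c p r)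
    (a w : Int) (ha0 : 0 ≤ a) (haL : a.toNat < p.length) :
    pvCzip (PySem.List.pySetD c a (w, PySem.List.pyGetD r a 0)) (PySem.List.pySetD p a w) r := by
  obtain ⟨h1, h2, h3⟩ := hcz
  refine ⟨by rw [PySem.List.length_pySetD, PySem.List.length_pySetD]; exact h1,
          by rw [PySem.List.length_pySetD]; exact h2, ?_⟩
  intro x hx0
  rw [pvGetD_setD c a x _ _ ha0 (by omega) hx0, pvGetD_setD p a x _ _ ha0 haL hx0]
  by_cases h : x = a
  · rw [if_pos h, if_pos h, h]
  · rw [if_neg h, if_neg h, h3 x hx0]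

lemma pvCzip_set2 {c : List (Int × Int)} {p r : List Int} (hcz : pvCzip c p r)
    (a ρ : Int) (ha0 : 0 ≤ a) (haL : a.toNat < p.length) :
    pvCzip (PySem.List.pySetD c a (PySem.List.pyGetD p a 0, ρ)) p (PySem.List.pySetD r a ρ) := by
  obtain ⟨h1, h2, h3⟩ := hcz
  refine ⟨by rw [PySem.List.length_pySetD]; exact h1,
          by rw [PySem.List.length_pySetD]; exact h2, ?_⟩
  intro x hx0
  rw [pvGetD_setD c a x _ _ ha0 (by omega) hx0, pvGetD_setD r a x _ _ ha0 (by omega) hx0]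
  by_cases h : x = a
  · rw [if_pos h, if_pos h, h]
  · rw [if_neg h, if_neg h, h3 x hx0]

lemma pvInit_get (n : Nat) (x : Int) (hx0 : 0 ≤ x) (hL : x.toNat < n) :
    PySem.List.pyGetD (List.map (fun (i : Nat) => (i : Int)) (List.range n)) x 0 = x := by
  rw [PySem.List.pyGetD_of_nonneg _ _ hx0, List.getD_eq_getElem?_getD,
      List.getElem?_map, List.getElem?_range hL]
  show ((x.toNat : Nat) : Int) = x
  omega

lemma pvInit_rank (n : Nat) (x : Int) (hx0 : 0 ≤ x) :
    PySem.List.pyGetD (List.map (fun (_ : Nat) => (0 : Int)) (List.range n)) x 0 = 0 := by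
  by_cases hL : x.toNat < n
  · rw [PySem.List.pyGetD_of_nonneg _ _ hx0, List.getD_eq_getElem?_getD,
        List.getElem?_map, List.getElem?_range hL]
    rfl
  · exact pvGetD_oob _ x 0 hx0 (by rw [List.length_map, List.length_range]; omega)

lemma pvWF_init (n : Nat) :
    pvWF (List.map (fun (i : Nat) => (i : Int)) (List.range n)) (List.map (fun (_ : Nat) => (0 : Int)) (List.range n)) := by
  constructor
  · rw [List.length_map, List.length_map]
  · intro j hj
    rw [List.length_map, List.length_range] at hj
    refine ⟨j, by rw [List.length_map, List.length_range]; exact hj, ?_, ?_⟩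
    · exact pvInit_get n (j : Int) (by positivity) (by omega)
    · intro h; exact absurd rfl h

lemma pvCzip_init (n : Nat) :
    pvCzip (List.map (fun (i : Nat) => ((i : Int), (0 : Int))) (List.range n))
      (List.map (fun (i : Nat) => (i : Int)) (List.range n)) (List.map (fun (_ : Nat) => (0 : Int)) (List.range n)) := by
  refine ⟨by rw [List.length_map, List.length_map],
          by rw [List.length_map, List.length_map], ?_⟩
  intro x hx0
  rw [pvInit_rank n x hx0]
  by_cases hL : x.toNat < n
  · rw [pvInit_get n x hx0 hL, PySem.List.pyGetD_of_nonneg _ _ hx0, List.getD_eq_getElem?_getD,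
        List.getElem?_map, List.getElem?_range hL]
    show (((x.toNat : Nat) : Int), (0 : Int)) = (x, 0)
    rw [show ((x.toNat : Nat) : Int) = x by omega]
  · rw [pvGetD_oob _ x _ hx0 (by rw [List.length_map, List.length_range]; omega),
        pvGetD_oob _ x _ hx0 (by rw [List.length_map, List.length_range]; omega)]

lemma pvFlip_eq (c : Char) (hc : c ∈ ['0','1','2','3','4','5','6','7','8','9']) :
    pvFlipA c = pvFlipB c := by
  fin_cases hc <;> decide

lemma pvFoldSet_get (chars : List Char) :
    ∀ (coord : List Int), (∀ e ∈ coord, 0 ≤ e ∧ e.toNat < chars.length) →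
      ∀ (nv : List Char), nv.length = chars.length → ∀ (k : Nat),
      (coord.foldl (fun nv index =>
        PySem.List.pySetD nv index (pvFlipA (PySem.List.pyGetD chars index ' '))) nv)[k]?
        = if (k : Int) ∈ coord then
            (if k < chars.length then some (pvFlipA (PySem.List.pyGetD chars (k : Int) ' '))
             else none)
          else nv[k]? := by
  intro coord
  induction coord with
  | nil =>
    intro hc nv hlen k
    simp
  | cons i rest ih =>
    intro hc nv hlen k
    obtain ⟨hi0, hiL⟩ := hc i (by simp)
    rw [List.foldl_cons]
    rw [ih (fun e he => hc e (by simp [he])) _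
        (by rw [PySem.List.length_pySetD]; exact hlen) k]
    by_cases hmem : (k : Int) ∈ rest
    · rw [if_pos hmem, if_pos (List.mem_cons_of_mem _ hmem)]
    · rw [if_neg hmem]
      by_cases hki : (k : Int) = i
      · rw [if_pos (by simp [hki])]
        have hk : k < chars.length := by omega
        rw [if_pos hk]
        rw [PySem.List.pySetD_of_nonneg nv _ hi0, show k = i.toNat by omega]
        simp [List.getElem?_set, hlen, hiL, show i.toNat < nv.length by omega]
        rw [show max i 0 = i by omega]
      · rw [if_neg (by simp [hki, hmem])]
        rw [PySem.List.pySetD_of_nonneg nv _ hi0, List.getElem?_set_ne (by omega)]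

lemma pvHamming_eq (vertex : String) (d : Nat)
    (hd : ∀ c ∈ vertex.toList, c ∈ ['0','1','2','3','4','5','6','7','8','9']) :
    hamming_possibilies vertex d = pvHammingB vertex d := by
  unfold hamming_possibilies pvHammingB
  apply List.map_congr_left
  intro coord hcoord
  obtain ⟨hsub, hlen⟩ := (PySem.List.mem_combinations_iff _ _ _).1 hcoord
  have hc : ∀ e ∈ coord, 0 ≤ e ∧ e.toNat < vertex.toList.length := by
    intro e he
    have := (PySem.List.mem_pyRange_one).1 (hsub.subset he)
    omega
  congr 1
  apply List.ext_getElem?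
  intro k
  rw [pvFoldSet_get vertex.toList coord hc vertex.toList rfl k]
  rw [List.getElem?_map]
  by_cases hk : k < vertex.toList.length
  · rw [PySem.List.getElem?_enumerate, List.getElem?_eq_getElem hk]
    show _ = some (if PySem.Set.contains (PySem.Set.ofList coord) ((0 : Int) + (k : Int))
        then pvFlipB vertex.toList[k] else vertex.toList[k])
    rw [show (0 : Int) + (k : Int) = (k : Int) by omega]
    by_cases hmem : (k : Int) ∈ coord
    · rw [if_pos hmem, if_pos hk]
      have hcont : PySem.Set.contains (PySem.Set.ofList coord) (k : Int) = true := by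
        rw [PySem.Set.contains_iff, PySem.Set.mem_ofList]; exact hmem
      rw [hcont, if_pos rfl]
      have hget : PySem.List.pyGetD vertex.toList (k : Int) ' ' = vertex.toList[k] := by
        rw [PySem.List.pyGetD_natCast, List.getD_eq_getElem?_getD, List.getElem?_eq_getElem hk]
        rfl
      rw [hget, pvFlip_eq _ (hd _ (List.getElem_mem hk))]
    · rw [if_neg hmem]
      have hcont : PySem.Set.contains (PySem.Set.ofList coord) (k : Int) = false := by
        rw [← Bool.not_eq_true, PySem.Set.contains_iff, PySem.Set.mem_ofList]
        exact hmem
      rw [hcont]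
      rfl
  · have hmem : (k : Int) ∉ coord := fun h => hk (by have := hc _ h; omega)
    rw [if_neg hmem, PySem.List.getElem?_enumerate]
    rw [List.getElem?_eq_none (le_of_not_gt hk)]
    rfl

def pvDictInv (s : Int) (d : PySem.Dict String Int) : Prop :=
  0 ≤ s ∧ d.keys.Nodup ∧ d.values.Nodup ∧ ∀ w ∈ d.values, 1 ≤ w ∧ w ≤ s

lemma pvMap_overwrite_nodup :
    ∀ (l : List (String × Int)) (x : String) (w : Int),
      (l.map (·.1)).Nodup → (l.map (·.2)).Nodup → (∀ p ∈ l, p.2 ≠ w) →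
      ((l.map (fun p => if p.1 == x then (x, w) else p)).map (·.2)).Nodup := by
  intro l
  induction l with
  | nil => intro x w _ _ _; simp
  | cons p t ih =>
    intro x w hk hv hw
    rw [List.map_cons, List.map_cons] at *
    by_cases hpx : p.1 == x
    · rw [if_pos hpx]
      have hkeq : p.1 = x := by simpa using hpx
      have htid : t.map (fun q => if q.1 == x then (x, w) else q) = t := by
        rw [show t = t.map id by simp]
        rw [List.map_map]
        apply List.map_congr_left
        intro q hq
        simp only [Function.comp, id]
        rw [if_neg]
        simp only [beq_iff_eq]
        intro hqx
        have := (List.nodup_cons.1 hk).1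
        exact this (by rw [hkeq, ← hqx]; exact List.mem_map_of_mem hq)
      rw [htid]
      rw [List.nodup_cons]
      refine ⟨?_, (List.nodup_cons.1 hv).2⟩
      intro hmem
      obtain ⟨q, hq, hq2⟩ := List.mem_map.1 hmem
      exact hw q (List.mem_cons_of_mem _ hq) hq2
    · rw [if_neg hpx]
      rw [List.nodup_cons]
      refine ⟨?_, ih x w (List.nodup_cons.1 hk).2 (List.nodup_cons.1 hv).2
        (fun q hq => hw q (List.mem_cons_of_mem _ hq))⟩
      intro hmem
      obtain ⟨q, hq, hq2⟩ := List.mem_map.1 hmem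
      obtain ⟨q', hq', rfl⟩ := List.mem_map.1 hq
      by_cases hq'x : q'.1 == x
      · rw [if_pos hq'x] at hq2
        exact hw p (by simp) (by simpa using hq2.symm)
      · rw [if_neg hq'x] at hq2
        exact (List.nodup_cons.1 hv).1 (hq2 ▸ List.mem_map_of_mem hq')

lemma pvInsert_inv (d : PySem.Dict String Int) (x : String) (s : Int)
    (h : pvDictInv s d) : pvDictInv (s + 1) (d.insert x (s + 1)) := by
  obtain ⟨hs, hk, hv, hb⟩ := h
  refine ⟨by omega, PySem.Dict.nodup_keys_insert d x _ hk, ?_, ?_⟩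
  · by_cases hc : d.contains x
    · show ((d.insert x (s+1)).items.map (·.2)).Nodup
      rw [PySem.Dict.items_insert_of_contains d _ hc]
      exact pvMap_overwrite_nodup d.items x (s+1) hk hv
        (fun p hp => by
          have := hb p.2 (List.mem_map_of_mem hp)
          omega)
    · show ((d.insert x (s+1)).items.map (·.2)).Nodup
      rw [PySem.Dict.items_insert_of_not_contains d _ (by simpa using hc)]
      rw [List.map_append, List.map_singleton]
      rw [List.nodup_append]
      refine ⟨hv, List.nodup_singleton _, ?_⟩
      intro a ha b hb2
      have ha1 := hb a ha
      have ha2 : b = s + 1 := List.mem_singleton.1 hb2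
      omega
  · intro w hw
    rcases PySem.Dict.mem_values_insert d x (s+1) w hw with rfl | hmem
    · omega
    · have := hb w hmem; omega

lemma pvBuild (xs : List String) :
    ∀ (s : Int) (d : PySem.Dict String Int), pvDictInv s d →
      pvDictInv (s + xs.length)
        ((PySem.List.enumerate xs s).foldl (fun d iv => d.insert iv.2 (iv.1 + 1)) d) := by
  induction xs with
  | nil => intro s d h; simpa using h
  | cons x t ih =>
    intro s d h
    rw [PySem.List.enumerate_cons, List.foldl_cons]
    have h1 := pvInsert_inv d x s h
    have h2 := ih (s + 1) _ h1
    have : s + 1 + (t.length : Int) = s + ((x :: t).length : Int) := by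
      rw [List.length_cons]; push_cast; ring
    rw [this] at h2
    exact h2

lemma pvSetLen (xs : List Int) : PySem.Set.len (PySem.Set.ofList xs) = (xs.toFinset.card : Int) := by
  show ((PySem.Set.ofList xs).length : Int) = _
  rw [← List.toFinset_card_of_nodup (PySem.Set.nodup_ofList xs)]
  have h : (PySem.Set.ofList xs).toFinset = xs.toFinset := by
    ext a; simp [PySem.Set.mem_ofList]
  rw [h]

lemma pvImage_subst (S : Finset Int) (u v : Int) (hu : u ∈ S) (hv : v ∈ S) (huv : u ≠ v) :
    S.image (fun x => if x = u then v else x) = S.erase u := by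
  ext y
  simp only [Finset.mem_image, Finset.mem_erase]
  constructor
  · rintro ⟨x, hx, rfl⟩
    by_cases hxu : x = u
    · rw [if_pos hxu]
      exact ⟨Ne.symm huv, hv⟩
    · rw [if_neg hxu]
      exact ⟨hxu, hx⟩
  · rintro ⟨hyu, hy⟩
    exact ⟨y, hy, if_neg hyu⟩

lemma pvImage_subst_card (S : Finset Int) (u v : Int) (hu : u ∈ S) (hv : v ∈ S) (huv : u ≠ v) :
    ((S.image (fun x => if x = u then v else x)).card : Int) = (S.card : Int) - 1 := by
  rw [pvImage_subst S u v hu hv huv, Finset.card_erase_of_mem hu]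
  have : 1 ≤ S.card := Finset.card_pos.2 ⟨u, hu⟩
  push_cast [Nat.cast_sub this]
  ring

lemma pvGetD_mem_values (d : PySem.Dict String Int) (k : String)
    (hc : d.contains k = true) (d0 : Int) : d.getD k d0 ∈ d.values := by
  rw [PySem.Dict.contains_eq_isSome_get?] at hc
  obtain ⟨w, hw⟩ := Option.isSome_iff_exists.1 hc
  rw [PySem.Dict.getD_of_get?_eq_some d d0 hw]
  exact List.mem_map_of_mem (PySem.Dict.mem_items_of_get?_eq_some d hw)

lemma pvLeaders_contains (vertices : List String) (x : String) (hx : x ∈ vertices) :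
    ((PySem.List.enumerate vertices).foldl
      (fun d iv => d.insert iv.2 (iv.1 + 1)) PySem.Dict.empty).contains x = true := by
  rw [PySem.Dict.contains_iff_mem_keys]
  rw [show (fun (d : PySem.Dict String Int) (iv : Int × String) => d.insert iv.2 (iv.1 + 1))
      = (fun d iv => d.insert ((fun (iv : Int × String) => iv.2) iv)
          ((fun (d : PySem.Dict String Int) (iv : Int × String) => iv.1 + 1) d iv)) from rfl]
  rw [PySem.Dict.keys_foldl_insert_key]
  rw [PySem.List.map_snd_enumerate]
  have h0 : (PySem.Dict.empty : PySem.Dict String Int).keys = ([] : List String) := rfl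
  rw [h0, PySem.Set.update_nil_left, PySem.Set.mem_ofList]
  exact hx

def pvInv (L : List Int) (sA : List (Int × Int) × List Int × Int)
    (sB : List Int × List Int) : Prop :=
  pvCzip sA.1 sB.1 sB.2 ∧ pvWF sB.1 sB.2 ∧ sA.2.1.length = sB.1.length ∧
  (∀ id ∈ L, 0 ≤ id ∧ id.toNat < sB.1.length) ∧
  sA.2.2 = ((L.toFinset.image (fun id => pvFindB sB.1 id (sB.1.length + 1))).card : Int) ∧
  ∀ id ∈ L, PySem.List.pyGetD sA.2.1 (pvFindB sB.1 id (sB.1.length + 1)) 0 ≠ 0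

lemma pvStep_core (L : List Int) (cA : List (Int × Int)) (bd : List Int) (k : Int)
    (p r : List Int) (h : pvInv L (cA, bd, k) (p, r))
    (a b la lb : Int) (hla : la ∈ L) (hlb : lb ∈ L)
    (hFa : pvFindB p la (p.length + 1) = a) (hFb : pvFindB p lb (p.length + 1) = b)
    (hab : a ≠ b)
    (r' : List Int) (hw' : pvWF (PySem.List.pySetD p a b) r')
    (cA' : List (Int × Int)) (hcz' : pvCzip cA' (PySem.List.pySetD p a b) r') :
    pvInv L (cA', PySem.List.pySetD bd a 0, k - 1) (PySem.List.pySetD p a b, r') := by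
  obtain ⟨hcz, hw, hblen, hids, hcount, hboard⟩ := h
  have hbd : bd.length = p.length := hblen
  have hk : k = ((L.toFinset.image (fun id => pvFindB p id (p.length + 1))).card : Int) := hcount
  obtain ⟨hla0, hlaL⟩ := hids la hla
  obtain ⟨hlb0, hlbL⟩ := hids lb hlb
  have hpa := pvFind_props hw la hla0 hlaL
  have hpb := pvFind_props hw lb hlb0 hlbL
  rw [hFa] at hpa
  rw [hFb] at hpb
  obtain ⟨ha0, haL, hra, -⟩ := hpa
  obtain ⟨hb0, hbL, hrb, -⟩ := hpb
  have hplen : (PySem.List.pySetD p a b).length = p.length := PySem.List.length_pySetD p a b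
  have hsubst : ∀ id ∈ L, pvFindB (PySem.List.pySetD p a b) id (p.length + 1)
      = (if pvFindB p id (p.length + 1) = a then b else pvFindB p id (p.length + 1)) := by
    intro id hid
    obtain ⟨hid0, hidL⟩ := hids id hid
    exact pvFind_set_top hw a b ha0 haL hb0 hbL hra hrb hab id hid0 hidL
  have himg : L.toFinset.image
        (fun id => pvFindB (PySem.List.pySetD p a b) id (p.length + 1))
      = (L.toFinset.image (fun id => pvFindB p id (p.length + 1))).image
          (fun x => if x = a then b else x) := by
    rw [Finset.image_image]
    apply Finset.image_congr
    intro id hid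
    exact hsubst id (List.mem_toFinset.1 hid)
  refine ⟨hcz', hw', ?_, ?_, ?_, ?_⟩
  · show (PySem.List.pySetD bd a 0).length = _
    rw [PySem.List.length_pySetD, hplen, hblen]
  · intro id hid
    obtain ⟨h1, h2⟩ := hids id hid
    exact ⟨h1, by rw [hplen]; exact h2⟩
  · show k - 1 = _
    rw [hplen, himg]
    rw [pvImage_subst_card _ a b
      (Finset.mem_image.2 ⟨la, List.mem_toFinset.2 hla, hFa⟩)
      (Finset.mem_image.2 ⟨lb, List.mem_toFinset.2 hlb, hFb⟩) hab]
    rw [hk]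
  · intro id hid
    show PySem.List.pyGetD (PySem.List.pySetD bd a 0)
        (pvFindB (PySem.List.pySetD p a b) id ((PySem.List.pySetD p a b).length + 1)) 0 ≠ 0
    rw [hplen, hsubst id hid]
    obtain ⟨hid0, hidL⟩ := hids id hid
    obtain ⟨hF0, hFL, -, -⟩ := pvFind_props hw id hid0 hidL
    by_cases hFe : pvFindB p id (p.length + 1) = a
    · rw [if_pos hFe]
      rw [pvGetD_setD bd a b 0 0 ha0 (by rw [hbd]; omega) hb0, if_neg (Ne.symm hab)]
      rw [← hFb]
      exact hboard lb hlb
    · rw [if_neg hFe]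
      rw [pvGetD_setD bd a _ 0 0 ha0 (by rw [hbd]; omega) hF0, if_neg hFe]
      exact hboard id hid

lemma pvUnionB_eq_of_roots_eq (p r : List Int) (lv ln : Int)
    (huv : pvFindB p lv (p.length + 1) = pvFindB p ln (p.length + 1)) :
    pvUnionB p r lv ln = (p, r) := by
  unfold pvUnionB
  rw [if_pos (by simp [huv])]

lemma pvStep (leaders : PySem.Dict String Int) (vertex neighber : String)
    (hvv : leaders.contains vertex = true)
    (sA : List (Int × Int) × List Int × Int) (sB : List Int × List Int)
    (h : pvInv leaders.values sA sB) :
    pvInv leaders.values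
      (if leaders.contains neighber then
         if pvFindA sA.1 (leaders.getD vertex 0) (sA.1.length + 1) ==
            pvFindA sA.1 (leaders.getD neighber 0) (sA.1.length + 1) then sA
         else
           if PySem.List.pyGetD sA.2.1
               (pvUnionA sA.1 (leaders.getD vertex 0) (leaders.getD neighber 0)).2 0 ≠ 0 then
             ((pvUnionA sA.1 (leaders.getD vertex 0) (leaders.getD neighber 0)).1,
              PySem.List.pySetD sA.2.1
                (pvUnionA sA.1 (leaders.getD vertex 0) (leaders.getD neighber 0)).2 0,
              sA.2.2 - 1)
           else ((pvUnionA sA.1 (leaders.getD vertex 0) (leaders.getD neighber 0)).1,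
                 sA.2.1, sA.2.2)
       else sA)
      (if leaders.contains neighber then
         pvUnionB sB.1 sB.2 (leaders.getD vertex 0) (leaders.getD neighber 0)
       else sB) := by
  by_cases hc : leaders.contains neighber = true
  swap
  · rw [if_neg hc, if_neg hc]; exact h
  rw [if_pos hc, if_pos hc]
  have hcz := h.1
  have hw := h.2.1
  have hids := h.2.2.2.1
  have hboard := h.2.2.2.2.2
  have hlvm : leaders.getD vertex 0 ∈ leaders.values := pvGetD_mem_values leaders vertex hvv 0
  have hlnm : leaders.getD neighber 0 ∈ leaders.values := pvGetD_mem_values leaders neighber hc 0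
  obtain ⟨hlv0, hlvL⟩ := hids _ hlvm
  obtain ⟨hln0, hlnL⟩ := hids _ hlnm
  have hclen : sA.1.length = sB.1.length := hcz.1
  have hfa : ∀ x : Int, 0 ≤ x →
      pvFindA sA.1 x (sA.1.length + 1) = pvFindB sB.1 x (sB.1.length + 1) := by
    intro x hx0
    rw [hclen]
    exact pvFindA_eq hcz hw _ x hx0
  have hcg := hcz.2.2
  set lv := leaders.getD vertex 0 with hlvdef
  set ln := leaders.getD neighber 0 with hlndef
  set u := pvFindB sB.1 lv (sB.1.length + 1) with hudef
  set v := pvFindB sB.1 ln (sB.1.length + 1) with hvdef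
  obtain ⟨hu0, huL, hur, -⟩ := pvFind_props hw lv hlv0 hlvL
  obtain ⟨hv0, hvL, hvr, -⟩ := pvFind_props hw ln hln0 hlnL
  rw [hfa lv hlv0, hfa ln hln0, ← hudef, ← hvdef]
  have h' : pvInv leaders.values (sA.1, sA.2.1, sA.2.2) (sB.1, sB.2) := h
  by_cases huv : u = v
  · rw [if_pos (by simp [huv]), pvUnionB_eq_of_roots_eq sB.1 sB.2 lv ln (by rw [← hudef, ← hvdef]; exact huv)]
    exact h
  · rw [if_neg (by simp [huv])]
    have hA1 : pvFindA sA.1 lv (sA.1.length + 1) = u := by rw [hfa lv hlv0]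
    have hA2 : pvFindA sA.1 ln (sA.1.length + 1) = v := by rw [hfa ln hln0]
    have hrkA : ∀ x : Int, 0 ≤ x →
        (PySem.List.pyGetD sA.1 x ((0 : Int), (0 : Int))).2 = PySem.List.pyGetD sB.2 x 0 := by
      intro x hx0; rw [hcg x hx0]
    by_cases hrk : PySem.List.pyGetD sB.2 v 0 < PySem.List.pyGetD sB.2 u 0
    · -- rank u > rank v : parent[v] := u, removed v
      have hAu : pvUnionA sA.1 lv ln =
          (PySem.List.pySetD sA.1 v (u, PySem.List.pyGetD sB.2 v 0), v) := by
        unfold pvUnionA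
        rw [hA1, hA2, if_neg (by simp [huv]), hrkA u hu0, hrkA v hv0,
            if_pos (by exact hrk)]
      have hBu : pvUnionB sB.1 sB.2 lv ln = (PySem.List.pySetD sB.1 v u, sB.2) := by
        unfold pvUnionB
        rw [← hudef, ← hvdef, if_neg (by simp [huv]), if_pos (by exact hrk)]
      rw [hAu, hBu]
      have hbne : PySem.List.pyGetD sA.2.1 v 0 ≠ 0 := hboard ln hlnm
      rw [if_pos hbne]
      exact pvStep_core leaders.values sA.1 sA.2.1 sA.2.2 sB.1 sB.2 h' v u ln lv hlnm hlvm
        rfl rfl (Ne.symm huv) sB.2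
        (pvWF_link_lt hw v u hv0 hvL hu0 huL hrk)
        _ (pvCzip_set1 hcz v u hv0 hvL)
    · -- rank u <= rank v : parent[u] := v, removed u
      have hcz1 := pvCzip_set1 hcz u v hu0 huL
      have hA1len : (PySem.List.pySetD sA.1 u (v, PySem.List.pyGetD sB.2 u 0)).length
          = sA.1.length := PySem.List.length_pySetD _ _ _
      by_cases hre : PySem.List.pyGetD sB.2 u 0 = PySem.List.pyGetD sB.2 v 0
      · have hAu : pvUnionA sA.1 lv ln =
            (PySem.List.pySetD (PySem.List.pySetD sA.1 u (v, PySem.List.pyGetD sB.2 u 0)) v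
              (PySem.List.pyGetD (PySem.List.pySetD sB.1 u v) v 0,
               PySem.List.pyGetD sB.2 v 0 + 1), u) := by
          unfold pvUnionA
          rw [hA1, hA2, if_neg (by simp [huv]), hrkA u hu0, hrkA v hv0,
              if_neg (by omega)]
          show ((if ((PySem.List.pyGetD (PySem.List.pySetD sA.1 u (v, PySem.List.pyGetD sB.2 u 0)) u ((0:Int),(0:Int))).2 ==
                     (PySem.List.pyGetD (PySem.List.pySetD sA.1 u (v, PySem.List.pyGetD sB.2 u 0)) v ((0:Int),(0:Int))).2) = true
                then PySem.List.pySetD (PySem.List.pySetD sA.1 u (v, PySem.List.pyGetD sB.2 u 0)) v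
                       ((PySem.List.pyGetD (PySem.List.pySetD sA.1 u (v, PySem.List.pyGetD sB.2 u 0)) v ((0:Int),(0:Int))).1,
                        (PySem.List.pyGetD (PySem.List.pySetD sA.1 u (v, PySem.List.pyGetD sB.2 u 0)) v ((0:Int),(0:Int))).2 + 1)
                else PySem.List.pySetD sA.1 u (v, PySem.List.pyGetD sB.2 u 0)), u) = _
          have hgu2 : (PySem.List.pyGetD (PySem.List.pySetD sA.1 u (v, PySem.List.pyGetD sB.2 u 0)) u ((0:Int),(0:Int))).2
              = PySem.List.pyGetD sB.2 u 0 := by rw [hcz1.2.2 u hu0]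
          have hgv1 : (PySem.List.pyGetD (PySem.List.pySetD sA.1 u (v, PySem.List.pyGetD sB.2 u 0)) v ((0:Int),(0:Int))).1
              = PySem.List.pyGetD (PySem.List.pySetD sB.1 u v) v 0 := by rw [hcz1.2.2 v hv0]
          have hgv2 : (PySem.List.pyGetD (PySem.List.pySetD sA.1 u (v, PySem.List.pyGetD sB.2 u 0)) v ((0:Int),(0:Int))).2
              = PySem.List.pyGetD sB.2 v 0 := by rw [hcz1.2.2 v hv0]
          rw [hgu2, hgv1, hgv2]
          rw [if_pos (by simp [hre])]
        have hBu : pvUnionB sB.1 sB.2 lv ln =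
            (PySem.List.pySetD sB.1 u v,
             PySem.List.pySetD sB.2 v (PySem.List.pyGetD sB.2 v 0 + 1)) := by
          unfold pvUnionB
          rw [← hudef, ← hvdef, if_neg (by simp [huv]), if_neg (by omega),
              if_pos (by simp [hre])]
        rw [hAu, hBu]
        have hbne : PySem.List.pyGetD sA.2.1 u 0 ≠ 0 := hboard lv hlvm
        rw [if_pos hbne]
        have hcz2 := pvCzip_set2 hcz1 v (PySem.List.pyGetD sB.2 v 0 + 1) hv0
          (by rw [PySem.List.length_pySetD]; exact hvL)
        exact pvStep_core leaders.values sA.1 sA.2.1 sA.2.2 sB.1 sB.2 h' u v lv ln hlvm hlnm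
          rfl rfl huv _
          (pvWF_link_eq hw u v hu0 huL hv0 hvL hur hvr huv hre)
          _ hcz2
      · have hAu : pvUnionA sA.1 lv ln =
            (PySem.List.pySetD sA.1 u (v, PySem.List.pyGetD sB.2 u 0), u) := by
          unfold pvUnionA
          rw [hA1, hA2, if_neg (by simp [huv]), hrkA u hu0, hrkA v hv0,
              if_neg (by omega)]
          show ((if ((PySem.List.pyGetD (PySem.List.pySetD sA.1 u (v, PySem.List.pyGetD sB.2 u 0)) u ((0:Int),(0:Int))).2 ==
                     (PySem.List.pyGetD (PySem.List.pySetD sA.1 u (v, PySem.List.pyGetD sB.2 u 0)) v ((0:Int),(0:Int))).2) = true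
                then PySem.List.pySetD (PySem.List.pySetD sA.1 u (v, PySem.List.pyGetD sB.2 u 0)) v
                       ((PySem.List.pyGetD (PySem.List.pySetD sA.1 u (v, PySem.List.pyGetD sB.2 u 0)) v ((0:Int),(0:Int))).1,
                        (PySem.List.pyGetD (PySem.List.pySetD sA.1 u (v, PySem.List.pyGetD sB.2 u 0)) v ((0:Int),(0:Int))).2 + 1)
                else PySem.List.pySetD sA.1 u (v, PySem.List.pyGetD sB.2 u 0)), u) = _
          have hgu2 : (PySem.List.pyGetD (PySem.List.pySetD sA.1 u (v, PySem.List.pyGetD sB.2 u 0)) u ((0:Int),(0:Int))).2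
              = PySem.List.pyGetD sB.2 u 0 := by rw [hcz1.2.2 u hu0]
          have hgv1 : (PySem.List.pyGetD (PySem.List.pySetD sA.1 u (v, PySem.List.pyGetD sB.2 u 0)) v ((0:Int),(0:Int))).1
              = PySem.List.pyGetD (PySem.List.pySetD sB.1 u v) v 0 := by rw [hcz1.2.2 v hv0]
          have hgv2 : (PySem.List.pyGetD (PySem.List.pySetD sA.1 u (v, PySem.List.pyGetD sB.2 u 0)) v ((0:Int),(0:Int))).2
              = PySem.List.pyGetD sB.2 v 0 := by rw [hcz1.2.2 v hv0]
          rw [hgu2, hgv1, hgv2]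
          rw [if_neg (by simp [hre])]
        have hBu : pvUnionB sB.1 sB.2 lv ln = (PySem.List.pySetD sB.1 u v, sB.2) := by
          unfold pvUnionB
          rw [← hudef, ← hvdef, if_neg (by simp [huv]), if_neg (by omega),
              if_neg (by simp [hre])]
        rw [hAu, hBu]
        have hbne : PySem.List.pyGetD sA.2.1 u 0 ≠ 0 := hboard lv hlvm
        rw [if_pos hbne]
        exact pvStep_core leaders.values sA.1 sA.2.1 sA.2.2 sB.1 sB.2 h' u v lv ln hlvm hlnm
          rfl rfl huv sB.2
          (pvWF_link_lt hw u v hu0 huL hv0 hvL (by omega))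
          _ hcz1

lemma pvFoldl_rel {α σ τ : Type} (R : σ → τ → Prop) (P : α → Prop)
    (f : σ → α → σ) (g : τ → α → τ) :
    ∀ (l : List α), (∀ x ∈ l, P x) →
      (∀ s t x, P x → R s t → R (f s x) (g t x)) →
      ∀ s t, R s t → R (l.foldl f s) (l.foldl g t) := by
  intro l
  induction l with
  | nil => intro _ _ s t h; exact h
  | cons x xs ih =>
    intro hl hstep s t h
    rw [List.foldl_cons, List.foldl_cons]
    exact ih (fun y hy => hl y (List.mem_cons_of_mem _ hy)) hstep _ _
      (hstep s t x (hl x (List.mem_cons_self)) h)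

lemma pvRun (leaders : PySem.Dict String Int) (vertices : List String) (spacing : Int)
    (hd : spacing ≤ 0 ∨ ∀ x ∈ vertices, ∀ c ∈ x.toList,
      c ∈ ['0','1','2','3','4','5','6','7','8','9'])
    (hcont : ∀ x ∈ vertices, leaders.contains x = true)
    (sA : List (Int × Int) × List Int × Int) (sB : List Int × List Int)
    (h : pvInv leaders.values sA sB) :
    pvInv leaders.values
      ((PySem.List.pyRange 1 (spacing + 1) 1).foldl (fun st i =>
        vertices.foldl (fun st vertex =>
          (hamming_possibilies vertex i.toNat).foldl (fun st neighber =>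
            if leaders.contains neighber then
              if pvFindA st.1 (leaders.getD vertex 0) (st.1.length + 1) ==
                 pvFindA st.1 (leaders.getD neighber 0) (st.1.length + 1) then st
              else
                let res := pvUnionA st.1 (leaders.getD vertex 0) (leaders.getD neighber 0)
                if PySem.List.pyGetD st.2.1 res.2 0 ≠ 0 then
                  (res.1, PySem.List.pySetD st.2.1 res.2 0, st.2.2 - 1)
                else (res.1, st.2.1, st.2.2)
            else st) st) st) sA)
      ((PySem.List.pyRange 1 (spacing + 1) 1).foldl (fun pr i =>
        vertices.foldl (fun pr vertex =>
          (pvHammingB vertex i.toNat).foldl (fun pr neighbor =>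
            if leaders.contains neighbor then
              pvUnionB pr.1 pr.2 (leaders.getD vertex 0) (leaders.getD neighbor 0)
            else pr) pr) pr) sB) := by
  rcases hd with hsp | hdig
  · rw [PySem.List.pyRange_one_eq_nil (by omega), List.foldl_nil, List.foldl_nil]
    exact h
  · apply pvFoldl_rel (pvInv leaders.values) (fun _ => True) _ _ _
      (fun _ _ => trivial) ?_ sA sB h
    intro s t i _ hst
    apply pvFoldl_rel (pvInv leaders.values) (fun x => x ∈ vertices) _ _ vertices
      (fun _ hx => hx) ?_ s t hst
    intro s t vertex hver hst
    rw [← pvHamming_eq vertex i.toNat (hdig vertex hver)]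
    apply pvFoldl_rel (pvInv leaders.values) (fun _ => True) _ _ _
      (fun _ _ => trivial) ?_ s t hst
    intro s t neighber _ hst
    exact pvStep leaders vertex neighber (hcont vertex hver) s t hst

lemma pvFind_init (n : Nat) (id : Int) (hid0 : 0 ≤ id) (hidL : id.toNat < n) :
    pvFindB (List.map (fun (i : Nat) => (i : Int)) (List.range n)) id
      ((List.map (fun (i : Nat) => (i : Int)) (List.range n)).length + 1) = id := by
  exact pvFind_root _ id _ (pvInit_get n id hid0 hidL)

lemma pvInit (L : List Int) (n : Nat) (k : Int)
    (hids : ∀ id ∈ L, 1 ≤ id ∧ id.toNat < n)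
    (hnodup : L.Nodup) (hk : k = (L.length : Int)) :
    pvInv L
      (List.map (fun (i : Nat) => ((i : Int), (0 : Int))) (List.range n),
       List.map (fun (i : Nat) => (i : Int)) (List.range n), k)
      (List.map (fun (i : Nat) => (i : Int)) (List.range n),
       List.map (fun (_ : Nat) => (0 : Int)) (List.range n)) := by
  have hplen : (List.map (fun (i : Nat) => (i : Int)) (List.range n)).length = n := by
    rw [List.length_map, List.length_range]
  refine ⟨pvCzip_init n, pvWF_init n, by rw [hplen], ?_, ?_, ?_⟩
  · intro id hid
    obtain ⟨h1, h2⟩ := hids id hid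
    exact ⟨by omega, by rw [hplen]; exact h2⟩
  · show k = _
    have himg : L.toFinset.image (fun id =>
        pvFindB (List.map (fun (i : Nat) => (i : Int)) (List.range n)) id
        ((List.map (fun (i : Nat) => (i : Int)) (List.range n)).length + 1)) = L.toFinset := by
      calc L.toFinset.image (fun id =>
            pvFindB (List.map (fun (i : Nat) => (i : Int)) (List.range n)) id
            ((List.map (fun (i : Nat) => (i : Int)) (List.range n)).length + 1))
          = L.toFinset.image id := by
            apply Finset.image_congr
            intro id hid
            obtain ⟨h1, h2⟩ := hids id (List.mem_toFinset.1 (by simpa using hid))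
            exact pvFind_init n id (by omega) h2
        _ = L.toFinset := Finset.image_id
    rw [himg, List.toFinset_card_of_nodup hnodup, hk]
  · intro id hid
    obtain ⟨h1, h2⟩ := hids id hid
    show PySem.List.pyGetD _ (pvFindB _ id _) 0 ≠ 0
    rw [pvFind_init n id (by omega) h2, pvInit_get n id (by omega) h2]
    omega

lemma pvLeaders_inv (vertices : List String) :
    pvDictInv (vertices.length : Int)
      ((PySem.List.enumerate vertices).foldl
        (fun d iv => d.insert iv.2 (iv.1 + 1)) (PySem.Dict.empty : PySem.Dict String Int)) := by
  have h0 : pvDictInv 0 (PySem.Dict.empty : PySem.Dict String Int) := by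
    refine ⟨le_rfl, List.nodup_nil, List.nodup_nil, ?_⟩
    intro w hw
    exact absurd hw (List.not_mem_nil)
  have := pvBuild vertices 0 PySem.Dict.empty h0
  rw [zero_add] at this
  exact this

-- ===== stage 2: ghost union-find ≍ B's label dict =====

lemma pvSubst_eq_iff (u1 u2 c d : Int) (hcd : c ≠ d) :
    ((if u1 = c then d else u1) = (if u2 = c then d else u2)) ↔
      (u1 = u2 ∨ ((u1 = c ∨ u1 = d) ∧ (u2 = c ∨ u2 = d))) := by
  split_ifs <;> omega

lemma pvRelabel (lw lu : Int) :
    ∀ (ks : List String) (lab : PySem.Dict String Int), ks.Nodup →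
      (∀ k ∈ ks, lab.contains k = true) →
      ((ks.foldl (fun l key => if l.getD key 0 == lw then l.insert key lu else l) lab).keys
          = lab.keys ∧
        ∀ k : String,
          (ks.foldl (fun l key => if l.getD key 0 == lw then l.insert key lu else l) lab).getD k 0
            = if k ∈ ks then (if lab.getD k 0 = lw then lu else lab.getD k 0)
              else lab.getD k 0) := by
  intro ks
  induction ks with
  | nil => intro lab _ _; simp
  | cons k0 rest ih =>
    intro lab hnd hsub
    have hc0 : lab.contains k0 = true := hsub k0 (by simp)
    have hl1keys : (if lab.getD k0 0 == lw then lab.insert k0 lu else lab).keys = lab.keys := by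
      split_ifs with h
      · exact PySem.Dict.keys_insert_of_contains lab lu hc0
      · rfl
    have hl1get : ∀ k : String,
        (if lab.getD k0 0 == lw then lab.insert k0 lu else lab).getD k 0
          = if k = k0 then (if lab.getD k0 0 = lw then lu else lab.getD k0 0)
            else lab.getD k 0 := by
      intro k
      by_cases hcond : lab.getD k0 0 = lw
      · rw [if_pos (by simpa using hcond), PySem.Dict.getD_insert]
        by_cases hk : k = k0
        · rw [if_pos hk, if_pos hk, if_pos hcond]
        · rw [if_neg hk, if_neg hk]
      · rw [if_neg (by simpa using hcond)]
        by_cases hk : k = k0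
        · rw [if_pos hk, if_neg hcond, hk]
        · rw [if_neg hk]
    have hcrest : ∀ k ∈ rest, (if lab.getD k0 0 == lw then lab.insert k0 lu else lab).contains k = true := by
      intro k hk
      rw [PySem.Dict.contains_iff_mem_keys, hl1keys, ← PySem.Dict.contains_iff_mem_keys]
      exact hsub k (List.mem_cons_of_mem _ hk)
    obtain ⟨ihk, ihg⟩ := ih (if lab.getD k0 0 == lw then lab.insert k0 lu else lab)
      (List.nodup_cons.1 hnd).2 hcrest
    rw [List.foldl_cons]
    refine ⟨by rw [ihk, hl1keys], ?_⟩
    intro k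
    rw [ihg k]
    simp only [List.mem_cons]
    by_cases hk : k = k0
    · subst hk
      have hkr : k ∉ rest := (List.nodup_cons.1 hnd).1
      rw [if_neg hkr, hl1get k, if_pos rfl, if_pos (Or.inl rfl)]
    · by_cases hkr : k ∈ rest
      · rw [if_pos hkr, if_pos (Or.inr hkr), hl1get k, if_neg hk]
      · rw [if_neg hkr, if_neg (show ¬(k = k0 ∨ k ∈ rest) from fun h => Or.elim h hk hkr), hl1get k, if_neg hk]

def pvInv2 (leaders : PySem.Dict String Int) (s : List Int × List Int)
    (lab : PySem.Dict String Int) : Prop :=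
  pvWF s.1 s.2 ∧ (∀ id ∈ leaders.values, 0 ≤ id ∧ id.toNat < s.1.length) ∧
  lab.keys = leaders.keys ∧
  ∀ k1 ∈ leaders.keys, ∀ k2 ∈ leaders.keys,
    (lab.getD k1 0 = lab.getD k2 0 ↔
      pvFindB s.1 (leaders.getD k1 0) (s.1.length + 1)
        = pvFindB s.1 (leaders.getD k2 0) (s.1.length + 1))

lemma pvInv2_core (leaders : PySem.Dict String Int) (p r r' : List Int)
    (lab lab' : PySem.Dict String Int) (x y lu lw : Int)
    (h : pvInv2 leaders (p, r) lab)
    (hw' : pvWF (PySem.List.pySetD p x y) r')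
    (hx0 : 0 ≤ x) (hxL : x.toNat < p.length) (hy0 : 0 ≤ y) (hyL : y.toNat < p.length)
    (hrx : PySem.List.pyGetD p x 0 = x) (hry : PySem.List.pyGetD p y 0 = y) (hxy : x ≠ y)
    (hlulw : lw ≠ lu)
    (hmem : ∀ k ∈ leaders.keys, ((lab.getD k 0 = lw ∨ lab.getD k 0 = lu) ↔
      (pvFindB p (leaders.getD k 0) (p.length + 1) = x ∨
       pvFindB p (leaders.getD k 0) (p.length + 1) = y)))
    (hkeys' : lab'.keys = lab.keys)
    (hget' : ∀ k ∈ leaders.keys, lab'.getD k 0 =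
      if lab.getD k 0 = lw then lu else lab.getD k 0) :
    pvInv2 leaders (PySem.List.pySetD p x y, r') lab' := by
  obtain ⟨hw, hids, hkeys, hker⟩ := h
  have hplen : (PySem.List.pySetD p x y).length = p.length := PySem.List.length_pySetD p x y
  refine ⟨hw', ?_, by rw [hkeys', hkeys], ?_⟩
  · intro id hid
    obtain ⟨h1, h2⟩ := hids id hid
    exact ⟨h1, by rw [hplen]; exact h2⟩
  · intro k1 hk1 k2 hk2
    have hcont : ∀ k ∈ leaders.keys, leaders.contains k = true := by
      intro k hk; exact (PySem.Dict.contains_iff_mem_keys leaders k).2 hk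
    have hid1 := hids _ (pvGetD_mem_values leaders k1 (hcont k1 hk1) 0)
    have hid2 := hids _ (pvGetD_mem_values leaders k2 (hcont k2 hk2) 0)
    have hsub1 := pvFind_set_top hw x y hx0 hxL hy0 hyL hrx hry hxy
      (leaders.getD k1 0) hid1.1 hid1.2
    have hsub2 := pvFind_set_top hw x y hx0 hxL hy0 hyL hrx hry hxy
      (leaders.getD k2 0) hid2.1 hid2.2
    rw [hplen, hsub1, hsub2, hget' k1 hk1, hget' k2 hk2]
    rw [pvSubst_eq_iff _ _ lw lu hlulw, pvSubst_eq_iff _ _ x y hxy]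
    have hb := hker k1 hk1 k2 hk2
    have hm1 := hmem k1 hk1
    have hm2 := hmem k2 hk2
    -- if root = y then root = y is a root equal to y; membership sets match
    constructor
    · rintro (he | ⟨ha, hb2⟩)
      · exact Or.inl (hb.1 he)
      · exact Or.inr ⟨hm1.1 ha, hm2.1 hb2⟩
    · rintro (he | ⟨ha, hb2⟩)
      · exact Or.inl (hb.2 he)
      · exact Or.inr ⟨hm1.2 ha, hm2.2 hb2⟩

lemma pvStep2 (leaders : PySem.Dict String Int) (hknd : leaders.keys.Nodup)
    (vertex neighber : String) (hvv : leaders.contains vertex = true)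
    (s : List Int × List Int) (lab : PySem.Dict String Int)
    (h : pvInv2 leaders s lab) :
    pvInv2 leaders
      (if leaders.contains neighber then
         pvUnionB s.1 s.2 (leaders.getD vertex 0) (leaders.getD neighber 0)
       else s)
      (if lab.contains neighber then
         if lab.getD vertex 0 ≠ lab.getD neighber 0 then
           lab.keys.foldl (fun l key =>
             if l.getD key 0 == lab.getD neighber 0 then l.insert key (lab.getD vertex 0) else l) lab
         else lab
       else lab) := by
  obtain ⟨hw, hids, hkeys, hker⟩ := h
  have hcontr : lab.contains neighber = leaders.contains neighber := by
    rw [PySem.Dict.contains_eq_decide_mem_keys, PySem.Dict.contains_eq_decide_mem_keys, hkeys]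
  by_cases hc : leaders.contains neighber = true
  swap
  · rw [if_neg hc, hcontr, if_neg hc]
    exact ⟨hw, hids, hkeys, hker⟩
  rw [if_pos hc, hcontr, if_pos hc]
  have hkv : vertex ∈ leaders.keys := (PySem.Dict.contains_iff_mem_keys leaders vertex).1 hvv
  have hkn : neighber ∈ leaders.keys := (PySem.Dict.contains_iff_mem_keys leaders neighber).1 hc
  set lv := leaders.getD vertex 0 with hlvdef
  set ln := leaders.getD neighber 0 with hlndef
  have hlvm : lv ∈ leaders.values := pvGetD_mem_values leaders vertex hvv 0
  have hlnm : ln ∈ leaders.values := pvGetD_mem_values leaders neighber hc 0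
  obtain ⟨hlv0, hlvL⟩ := hids _ hlvm
  obtain ⟨hln0, hlnL⟩ := hids _ hlnm
  set p := s.1 with hpdef
  set r := s.2 with hrdef
  set u := pvFindB p lv (p.length + 1) with hudef
  set v := pvFindB p ln (p.length + 1) with hvdef
  obtain ⟨hu0, huL, hur, -⟩ := pvFind_props hw lv hlv0 hlvL
  obtain ⟨hv0, hvL, hvr, -⟩ := pvFind_props hw ln hln0 hlnL
  set lu := lab.getD vertex 0 with hludef
  set lw := lab.getD neighber 0 with hlwdef
  have hkuv : lu = lw ↔ u = v := hker vertex hkv neighber hkn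
  by_cases huv : u = v
  · rw [if_neg (by simp [hkuv.2 huv]), pvUnionB_eq_of_roots_eq p r lv ln huv]
    exact ⟨hw, hids, hkeys, hker⟩
  · have hlune : lu ≠ lw := fun he => huv (hkuv.1 he)
    rw [if_pos (by simpa using hlune)]
    obtain ⟨hrlk, hrlg⟩ := pvRelabel lw lu lab.keys lab (hkeys ▸ hknd)
      (fun k hk => (PySem.Dict.contains_iff_mem_keys lab k).2 hk)
    have hget' : ∀ k ∈ leaders.keys,
        (lab.keys.foldl (fun l key =>
          if l.getD key 0 == lw then l.insert key lu else l) lab).getD k 0 =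
          if lab.getD k 0 = lw then lu else lab.getD k 0 := by
      intro k hk
      rw [hrlg k, if_pos (hkeys ▸ hk)]
    have hmem : ∀ k ∈ leaders.keys, ((lab.getD k 0 = lw ∨ lab.getD k 0 = lu) ↔
        (pvFindB p (leaders.getD k 0) (p.length + 1) = v ∨
         pvFindB p (leaders.getD k 0) (p.length + 1) = u)) := by
      intro k hk
      have h1 : lab.getD k 0 = lw ↔ pvFindB p (leaders.getD k 0) (p.length + 1) = v :=
        hker k hk neighber hkn
      have h2 : lab.getD k 0 = lu ↔ pvFindB p (leaders.getD k 0) (p.length + 1) = u :=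
        hker k hk vertex hkv
      exact or_congr h1 h2
    have hmem' : ∀ k ∈ leaders.keys, ((lab.getD k 0 = lw ∨ lab.getD k 0 = lu) ↔
        (pvFindB p (leaders.getD k 0) (p.length + 1) = u ∨
         pvFindB p (leaders.getD k 0) (p.length + 1) = v)) := by
      intro k hk
      rw [hmem k hk]
      exact or_comm
    have hlwlu : lw ≠ lu := Ne.symm hlune
    have hinv : pvInv2 leaders (p, r) lab := ⟨hw, hids, hkeys, hker⟩
    by_cases hrk : PySem.List.pyGetD r v 0 < PySem.List.pyGetD r u 0
    · have hBu : pvUnionB p r lv ln = (PySem.List.pySetD p v u, r) := by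
        unfold pvUnionB
        rw [← hudef, ← hvdef, if_neg (by simp [huv]), if_pos (by exact hrk)]
      rw [hBu]
      exact pvInv2_core leaders p r r lab _ v u lu lw hinv
        (pvWF_link_lt hw v u hv0 hvL hu0 huL hrk)
        hv0 hvL hu0 huL hvr hur (Ne.symm huv) hlwlu hmem hrlk hget'
    · by_cases hre : PySem.List.pyGetD r u 0 = PySem.List.pyGetD r v 0
      · have hBu : pvUnionB p r lv ln =
            (PySem.List.pySetD p u v,
             PySem.List.pySetD r v (PySem.List.pyGetD r v 0 + 1)) := by
          unfold pvUnionB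
          rw [← hudef, ← hvdef, if_neg (by simp [huv]), if_neg (by omega),
              if_pos (by simp [hre])]
        rw [hBu]
        exact pvInv2_core leaders p r _ lab _ u v lu lw hinv
          (pvWF_link_eq hw u v hu0 huL hv0 hvL hur hvr huv hre)
          hu0 huL hv0 hvL hur hvr huv hlwlu hmem' hrlk hget'
      · have hBu : pvUnionB p r lv ln = (PySem.List.pySetD p u v, r) := by
          unfold pvUnionB
          rw [← hudef, ← hvdef, if_neg (by simp [huv]), if_neg (by omega),
              if_neg (by simp [hre])]
        rw [hBu]
        exact pvInv2_core leaders p r r lab _ u v lu lw hinv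
          (pvWF_link_lt hw u v hu0 huL hv0 hvL (by omega))
          hu0 huL hv0 hvL hur hvr huv hlwlu hmem' hrlk hget'

lemma pvRun2 (leaders : PySem.Dict String Int) (hknd : leaders.keys.Nodup)
    (vertices : List String) (spacing : Int)
    (hcont : ∀ x ∈ vertices, leaders.contains x = true)
    (s : List Int × List Int) (lab : PySem.Dict String Int)
    (h : pvInv2 leaders s lab) :
    pvInv2 leaders
      ((PySem.List.pyRange 1 (spacing + 1) 1).foldl (fun pr i =>
        vertices.foldl (fun pr vertex =>
          (pvHammingB vertex i.toNat).foldl (fun pr neighbor =>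
            if leaders.contains neighbor then
              pvUnionB pr.1 pr.2 (leaders.getD vertex 0) (leaders.getD neighbor 0)
            else pr) pr) pr) s)
      ((PySem.List.pyRange 1 (spacing + 1) 1).foldl (fun lab i =>
        vertices.foldl (fun lab vertex =>
          (pvHammingB vertex i.toNat).foldl (fun lab neighbor =>
            if lab.contains neighbor then
              if lab.getD vertex 0 ≠ lab.getD neighbor 0 then
                lab.keys.foldl (fun l key =>
                  if l.getD key 0 == lab.getD neighbor 0 then l.insert key (lab.getD vertex 0) else l) lab
              else lab
            else lab) lab) lab) lab) := by
  apply pvFoldl_rel (pvInv2 leaders) (fun _ => True) _ _ _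
    (fun _ _ => trivial) ?_ s lab h
  intro s t i _ hst
  apply pvFoldl_rel (pvInv2 leaders) (fun x => x ∈ vertices) _ _ vertices
    (fun _ hx => hx) ?_ s t hst
  intro s t vertex hver hst
  apply pvFoldl_rel (pvInv2 leaders) (fun _ => True) _ _ _
    (fun _ _ => trivial) ?_ s t hst
  intro s t neighber _ hst
  exact pvStep2 leaders hknd vertex neighber (hcont vertex hver) s t hst

lemma pvInit2 (leaders : PySem.Dict String Int) (n : Nat)
    (hids : ∀ id ∈ leaders.values, 1 ≤ id ∧ id.toNat < n) :
    pvInv2 leaders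
      (List.map (fun (i : Nat) => (i : Int)) (List.range n),
       List.map (fun (_ : Nat) => (0 : Int)) (List.range n)) leaders := by
  refine ⟨pvWF_init n, ?_, rfl, ?_⟩
  · intro id hid
    obtain ⟨h1, h2⟩ := hids id hid
    exact ⟨by omega, by rw [List.length_map, List.length_range]; exact h2⟩
  · intro k1 hk1 k2 hk2
    have hcont : ∀ k ∈ leaders.keys, leaders.contains k = true := by
      intro k hk; exact (PySem.Dict.contains_iff_mem_keys leaders k).2 hk
    have hid1 := hids _ (pvGetD_mem_values leaders k1 (hcont k1 hk1) 0)
    have hid2 := hids _ (pvGetD_mem_values leaders k2 (hcont k2 hk2) 0)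
    rw [pvFind_init n _ (by omega) hid1.2, pvFind_init n _ (by omega) hid2.2]

lemma pvToFinset_map (l : List String) (f : String → Int) :
    (l.map f).toFinset = l.toFinset.image f := by
  ext a; simp

lemma pvCardKer (S : Finset String) (f g : String → Int) :
    (∀ a ∈ S, ∀ b ∈ S, (f a = f b ↔ g a = g b)) →
      (S.image f).card = (S.image g).card := by
  classical
  induction S using Finset.induction_on with
  | empty => intro _; simp
  | insert a S ha ih =>
    intro h
    rw [Finset.image_insert, Finset.image_insert]
    have hf : f a ∈ S.image f ↔ g a ∈ S.image g := by
      simp only [Finset.mem_image]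
      constructor
      · rintro ⟨b, hb, hfb⟩
        exact ⟨b, hb, (h b (Finset.mem_insert_of_mem hb) a (Finset.mem_insert_self a S)).1 hfb⟩
      · rintro ⟨b, hb, hgb⟩
        exact ⟨b, hb, (h b (Finset.mem_insert_of_mem hb) a (Finset.mem_insert_self a S)).2 hgb⟩
    have hres : ∀ x ∈ S, ∀ y ∈ S, (f x = f y ↔ g x = g y) := by
      intro x hx y hy
      exact h x (Finset.mem_insert_of_mem hx) y (Finset.mem_insert_of_mem hy)
    by_cases hm : f a ∈ S.image f
    · rw [Finset.insert_eq_self.2 hm, Finset.insert_eq_self.2 (hf.1 hm)]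
      exact ih hres
    · rw [Finset.card_insert_of_notMem hm, Finset.card_insert_of_notMem (fun hx => hm (hf.2 hx))]
      rw [ih hres]

-- ===== VERDICT (by name: the statement is the Claim_ definition above) =====
theorem largest_clusters_spec : Claim_equal_largest_clusters := by
  intro vertices num_of_vertices spacing hdom hpre
  unfold Spec_largest_clusters
  simp only [largest_clusters, largest_clusters_alt]
  set leaders := (PySem.List.enumerate vertices).foldl
    (fun d iv => d.insert iv.2 (iv.1 + 1)) (PySem.Dict.empty : PySem.Dict String Int) with hldef
  obtain ⟨hs0, hknd, hvnd, hvb⟩ := pvLeaders_inv vertices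
  have hsizev : (leaders.size : Int) = (leaders.values.length : Int) := by
    show ((leaders.items.length : Nat) : Int) = ((leaders.items.map (·.2)).length : Int)
    rw [List.length_map]
  by_cases hsp : spacing ≤ 0
  · -- no iteration at all: A returns len(leaders), B returns the number of distinct labels
    rw [PySem.List.pyRange_one_eq_nil (by omega), List.foldl_nil, List.foldl_nil]
    show (leaders.size : Int) = PySem.Set.len (PySem.Set.ofList leaders.values)
    rw [pvSetLen, List.toFinset_card_of_nodup hvnd, hsizev]
  · -- main path: coupled simulation of A's union-find fold and B's label fold
    have hcont : ∀ x ∈ vertices, leaders.contains x = true := by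
      intro x hx
      exact pvLeaders_contains vertices x hx
    have hlen : vertices = [] ∨ (vertices.length : Int) ≤ num_of_vertices := by
      rcases hpre with hnil | hsp' | ⟨hl, _⟩
      · exact Or.inl hnil
      · omega
      · exact Or.inr hl
    have hids : ∀ id ∈ leaders.values, 1 ≤ id ∧ id.toNat < (num_of_vertices + 1).toNat := by
      rcases hlen with hnil | hl
      · subst hnil
        intro id hid
        exact absurd hid (List.not_mem_nil)
      · intro id hid
        obtain ⟨h1, h2⟩ := hvb id hid
        refine ⟨h1, ?_⟩
        omega
    have hd : spacing ≤ 0 ∨ ∀ x ∈ vertices, ∀ c ∈ x.toList,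
        c ∈ ['0','1','2','3','4','5','6','7','8','9'] := by
      rcases hpre with hnil | hsp' | ⟨_, hall⟩
      · subst hnil
        right
        intro x hx
        exact absurd hx (List.not_mem_nil)
      · exact Or.inl hsp'
      · right
        intro x hx c hcx
        have h1 := (List.all_eq_true.1 hall) x hx
        have h2 := (List.all_eq_true.1 h1) c hcx
        simp only [Bool.and_eq_true, decide_eq_true_eq] at h2
        exact pvDigit_mem c h2.1 h2.2
    have hinit := pvInit leaders.values (num_of_vertices + 1).toNat (leaders.size : Int)
      hids hvnd hsizev
    have hfin := pvRun leaders vertices spacing hd hcont _ _ hinit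
    obtain ⟨-, -, -, -, hcount, -⟩ := hfin
    have hfin2 := pvRun2 leaders hknd vertices spacing hcont _ _
      (pvInit2 leaders (num_of_vertices + 1).toNat hids)
    obtain ⟨-, -, hkeysf, hkerf⟩ := hfin2
    rw [hcount]
    -- name the two final states
    set prf := (PySem.List.pyRange 1 (spacing + 1) 1).foldl (fun pr i =>
        vertices.foldl (fun pr vertex =>
          (pvHammingB vertex i.toNat).foldl (fun pr neighbor =>
            if leaders.contains neighbor then
              pvUnionB pr.1 pr.2 (leaders.getD vertex 0) (leaders.getD neighbor 0)
            else pr) pr) pr)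
        (List.map (fun (i : Nat) => (i : Int)) (List.range (num_of_vertices + 1).toNat),
         List.map (fun (_ : Nat) => (0 : Int)) (List.range (num_of_vertices + 1).toNat)) with hprf
    set labf := (PySem.List.pyRange 1 (spacing + 1) 1).foldl (fun lab i =>
        vertices.foldl (fun lab vertex =>
          (pvHammingB vertex i.toNat).foldl (fun lab neighbor =>
            if lab.contains neighbor then
              if lab.getD vertex 0 ≠ lab.getD neighbor 0 then
                lab.keys.foldl (fun l key =>
                  if l.getD key 0 == lab.getD neighbor 0 then l.insert key (lab.getD vertex 0) else l) lab
              else lab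
            else lab) lab) lab) leaders with hlabf
    have hlabnd : labf.keys.Nodup := by rw [hkeysf]; exact hknd
    have hBval : PySem.Set.len (PySem.Set.ofList labf.values) =
        ((leaders.keys.toFinset.image (fun k => labf.getD k 0)).card : Int) := by
      rw [pvSetLen, PySem.Dict.values_eq_map_keys labf hlabnd 0, pvToFinset_map, hkeysf]
    have hAval : ((leaders.values.toFinset.image
          (fun id => pvFindB prf.1 id (prf.1.length + 1))).card : Int) =
        ((leaders.keys.toFinset.image
          (fun k => pvFindB prf.1 (leaders.getD k 0) (prf.1.length + 1))).card : Int) := by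
      rw [PySem.Dict.values_eq_map_keys leaders hknd 0, pvToFinset_map, Finset.image_image]
      rfl
    rw [hAval, hBval]
    congr 1
    exact pvCardKer leaders.keys.toFinset _ _
      (fun a ha b hb => (hkerf a (List.mem_toFinset.1 ha) b (List.mem_toFinset.1 hb)).symm)
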